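-- pv_equiv track=rewrite | github.com/DianeBury/AdventOfCode | 2024/02/solve.py | is_report_valid_2
-- ===== SOURCE A (Python) =====
-- def is_report_valid_1(report: list):
--     # Report is safe if the differences between two consecutive values are either all positive or all negative
--     # and no diff is bigger than 3 (in absolute)
--     diff = [i - j for i,j in zip(report[:-1], report[1:])]
--     positive = [e > 0 and e < 4 for e in diff]
--     negative = [e < 0 and e > -4 for e in diff]
--     if all(positive) or all(negative):
--         return True
--     return False
--
-- def is_report_valid_2(report: list):
--     if is_report_valid_1(report):
--         return True
--     for i in range(len(report)):
--         alt_report = report[0:i] + report[i+1:]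
--         if is_report_valid_1(alt_report):
--             # Removing value report[i] makes the report safe
--             return True
--     return False
-- ===== SOURCE B (Python) =====
-- def is_report_valid_2(report: list):
--     # Single pass per direction: find the first adjacent pair that violates the
--     # bounded-step rule for that direction; only removing one end of that pair
--     # can possibly help, so test just those two removals.
--     def ok(a, b, s):
--         return 0 < s * (a - b) < 4
--
--     def mono(xs, s):
--         return all(ok(a, b, s) for a, b in zip(xs, xs[1:]))
--
--     def check(s):
--         k = 0
--         for a, b in zip(report, report[1:]):
--             if not ok(a, b, s):
--                 return (mono(report[:k] + report[k+1:], s)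
--                         or mono(report[:k+1] + report[k+2:], s))
--             k += 1
--         return True
--
--     return check(1) or check(-1)
-- ===== Notes on version B (the rewrite author's own statement) =====
-- stated objective: faster
-- what changed: Instead of retrying is_report_valid_1 on all n one-element deletions, B makes one pass per direction, locates the first adjacent pair violating that direction's bounded-step rule, and tests only the two removals that could repair it.
import Mathlib
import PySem

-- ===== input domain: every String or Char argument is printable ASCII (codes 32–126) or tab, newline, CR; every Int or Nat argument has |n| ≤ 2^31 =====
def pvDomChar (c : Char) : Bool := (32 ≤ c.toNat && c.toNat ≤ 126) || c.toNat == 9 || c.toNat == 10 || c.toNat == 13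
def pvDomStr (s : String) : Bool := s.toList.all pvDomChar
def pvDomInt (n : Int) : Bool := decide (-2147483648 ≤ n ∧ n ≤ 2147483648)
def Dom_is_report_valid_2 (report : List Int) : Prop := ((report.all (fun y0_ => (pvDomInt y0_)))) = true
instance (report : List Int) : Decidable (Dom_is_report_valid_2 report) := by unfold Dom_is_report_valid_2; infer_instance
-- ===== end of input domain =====

-- B replaces A's retry of the full validity check on every one-element deletion (O(n^2))
-- by one pass per direction that tests only the two removals at the first violating pair (O(n)).

-- ===== PORT A =====
def is_report_valid_1 (report : List Int) : Bool :=
  let diff := ((PySem.List.slice report none (some (-1))).zip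
      (PySem.List.slice report (some 1) none)).map (fun p => p.1 - p.2)
  let positive := diff.map (fun e => decide (e > 0) && decide (e < 4))
  let negative := diff.map (fun e => decide (e < 0) && decide (e > -4))
  positive.all id || negative.all id

def is_report_valid_2 (report : List Int) : Bool :=
  if is_report_valid_1 report then true
  else
    (PySem.List.pyRange 0 (report.length : Int) 1).any fun i =>
      is_report_valid_1 (PySem.List.slice report (some 0) (some i) ++
        PySem.List.slice report (some (i + 1)) none)

-- ===== PORT B =====
def pvOK (a b s : Int) : Bool := decide (0 < s * (a - b)) && decide (s * (a - b) < 4)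

def pvMono (xs : List Int) (s : Int) : Bool :=
  (xs.zip (xs.drop 1)).all fun p => pvOK p.1 p.2 s

-- the `for a, b in zip(report, report[1:])` loop of B's `check`, with counter k
def pvCheckAux (report : List Int) (s : Int) (pairs : List (Int × Int)) (k : Nat) : Bool :=
  match pairs with
  | [] => true
  | p :: rest =>
    if pvOK p.1 p.2 s then pvCheckAux report s rest (k + 1)
    else pvMono (report.take k ++ report.drop (k + 1)) s ||
         pvMono (report.take (k + 1) ++ report.drop (k + 2)) s

def is_report_valid_2_alt (report : List Int) : Bool :=
  pvCheckAux report 1 (report.zip (report.drop 1)) 0 ||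
  pvCheckAux report (-1) (report.zip (report.drop 1)) 0

-- ===== PRECONDITION & SPEC =====
def Spec_is_report_valid_2 (report : List Int) (out : Bool) : Prop := out = is_report_valid_2_alt report
instance (report : List Int) (out : Bool) : Decidable (Spec_is_report_valid_2 report out) := by unfold Spec_is_report_valid_2; infer_instance

-- ===== CLAIM (what is proved, stated in full; the proofs are below) =====
def Claim_equal_is_report_valid_2 : Prop := ∀ (report : List Int), Dom_is_report_valid_2 report → Spec_is_report_valid_2 report (is_report_valid_2 report)

-- ===== LEMMAS AND PROOFS =====

-- length of the list with index j removed
lemma pv_rem_len (xs : List Int) (j : Nat) (hj : j < xs.length) :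
    (xs.take j ++ xs.drop (j + 1)).length = xs.length - 1 := by
  simp; omega

-- element m of the list with index j removed, m before / at-or-after j
lemma pv_rem_get_lt (xs : List Int) (j m : Nat) (hj : j < xs.length) (hm : m < j) :
    (xs.take j ++ xs.drop (j + 1))[m]'(by simp; omega) = xs[m]'(by omega) := by
  rw [List.getElem_append_left (by simp; omega)]
  exact List.getElem_take

lemma pv_rem_get_ge (xs : List Int) (j m : Nat) (hj : j < xs.length) (hge : j ≤ m)
    (hm : m + 1 < xs.length) :
    (xs.take j ++ xs.drop (j + 1))[m]'(by simp; omega) = xs[m + 1]'(by omega) := by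
  rw [List.getElem_append_right (by simp; omega), List.getElem_drop]
  exact getElem_congr rfl (by rw [List.length_take]; omega) (by rw [List.length_take]; omega)

lemma pv_pairs_len (ys : List Int) : (ys.zip (ys.drop 1)).length = ys.length - 1 := by
  simp

lemma pv_pairs_get (ys : List Int) (i : Nat) (hi : i < (ys.zip (ys.drop 1)).length) :
    (ys.zip (ys.drop 1))[i] =
      (ys[i]'(by simp at hi; omega), ys[i + 1]'(by simp at hi; omega)) := by
  rw [List.getElem_zip]
  refine Prod.ext rfl ?_
  rw [List.getElem_drop]
  exact getElem_congr rfl (by omega) (by simp at hi; omega)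

-- distributing any over ||
lemma pv_any_or {α : Type} (l : List α) (p q : α → Bool) :
    l.any (fun x => p x || q x) = (l.any p || l.any q) := by
  induction l with
  | nil => rfl
  | cons a t ih => simp [List.any_cons, ih]; cases p a <;> cases q a <;> simp

-- KEY: if the pair at index k violates direction s, removing any index other than
-- k or k+1 leaves that pair adjacent, so the result is still not monotone for s.
lemma pv_rem_bad (xs : List Int) (s : Int) (k j : Nat)
    (hk : k < (xs.zip (xs.drop 1)).length)
    (hbad : pvOK ((xs.zip (xs.drop 1))[k]).1 ((xs.zip (xs.drop 1))[k]).2 s = false)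
    (hj : j < xs.length) (hjk : j ≠ k) (hjk1 : j ≠ k + 1) :
    pvMono (xs.take j ++ xs.drop (j + 1)) s = false := by
  have hk' : k < xs.length - 1 := by simpa [pv_pairs_len] using hk
  rw [pv_pairs_get xs k hk] at hbad
  apply List.all_eq_false.mpr
  have hcase : j < k ∨ k + 1 < j := by omega
  rcases hcase with hlt | hgt
  · -- the bad pair sits at index k-1 of the shortened list
    have hi : k - 1 < ((xs.take j ++ xs.drop (j + 1)).zip
        ((xs.take j ++ xs.drop (j + 1)).drop 1)).length := by
      rw [pv_pairs_len, pv_rem_len xs j hj]; omega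
    have hpair : ((xs.take j ++ xs.drop (j + 1)).zip
          ((xs.take j ++ xs.drop (j + 1)).drop 1))[k - 1]'hi =
        (xs[k]'(by omega), xs[k + 1]'(by omega)) := by
      rw [pv_pairs_get _ _ hi]
      refine Prod.ext ?_ ?_
      · rw [pv_rem_get_ge xs j (k - 1) hj (by omega) (by omega)]
        exact getElem_congr rfl (by omega) (by omega)
      · rw [pv_rem_get_ge xs j (k - 1 + 1) hj (by omega) (by omega)]
        exact getElem_congr rfl (by omega) (by omega)
    refine ⟨_, List.getElem_mem hi, ?_⟩
    rw [hpair]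
    simp [hbad]
  · -- the bad pair sits at index k of the shortened list
    have hi : k < ((xs.take j ++ xs.drop (j + 1)).zip
        ((xs.take j ++ xs.drop (j + 1)).drop 1)).length := by
      rw [pv_pairs_len, pv_rem_len xs j hj]; omega
    have hpair : ((xs.take j ++ xs.drop (j + 1)).zip
          ((xs.take j ++ xs.drop (j + 1)).drop 1))[k]'hi =
        (xs[k]'(by omega), xs[k + 1]'(by omega)) := by
      rw [pv_pairs_get _ _ hi]
      refine Prod.ext ?_ ?_
      · exact pv_rem_get_lt xs j k hj (by omega)
      · exact pv_rem_get_lt xs j (k + 1) hj (by omega)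
    refine ⟨_, List.getElem_mem hi, ?_⟩
    rw [hpair]
    simp [hbad]

-- A's inner check equals B's directional monotonicity tests
lemma pv_a1_eq (xs : List Int) :
    is_report_valid_1 xs = (pvMono xs 1 || pvMono xs (-1)) := by
  unfold is_report_valid_1 pvMono
  rw [PySem.List.slice_to_neg_one, PySem.List.slice_from_one, ← List.drop_one]
  have hz : xs.dropLast.zip (xs.drop 1) = xs.zip (xs.drop 1) := by
    apply List.ext_getElem
    · simp
    · intro i h1 h2
      rw [List.getElem_zip, List.getElem_zip]
      congr 1
      exact List.getElem_dropLast _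
  rw [hz]
  simp only [List.all_map, Function.comp_def, id_eq]
  congr 1
  · exact List.all_congr rfl fun p => by
      unfold pvOK; congr 1 <;> exact decide_eq_decide.mpr (by omega)
  · exact List.all_congr rfl fun p => by
      unfold pvOK; congr 1 <;> exact decide_eq_decide.mpr (by omega)

-- A's removal loop in Nat-indexed form
lemma pv_a2_eq (xs : List Int) :
    is_report_valid_2 xs =
      (is_report_valid_1 xs ||
        (List.range xs.length).any fun j =>
          is_report_valid_1 (xs.take j ++ xs.drop (j + 1))) := by
  unfold is_report_valid_2
  cases h : is_report_valid_1 xs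
  · rw [if_neg (by decide), Bool.false_or,
      PySem.List.pyRange_zero_nat, List.any_map]
    refine List.any_congr rfl fun j => ?_
    simp only [Function.comp_apply]
    congr 1
    rw [PySem.List.slice_zero_start, PySem.List.slice_to_natCast]
    congr 1
    rw [show ((j : Int) + 1) = ((j + 1 : Nat) : Int) by push_cast; ring,
      PySem.List.slice_from_natCast]
  · simp

-- B's loop, characterised: starting at position k with all earlier pairs valid,
-- it computes "xs monotone for s, or some single removal makes it so".
lemma pv_checkAux_eq (xs : List Int) (s : Int) :
    ∀ (d k : Nat), (xs.zip (xs.drop 1)).length - k = d →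
      (((xs.zip (xs.drop 1)).take k).all fun p => pvOK p.1 p.2 s) = true →
      pvCheckAux xs s ((xs.zip (xs.drop 1)).drop k) k =
        (pvMono xs s ||
          (List.range xs.length).any fun j => pvMono (xs.take j ++ xs.drop (j + 1)) s) := by
  intro d
  induction d with
  | zero =>
    intro k hd hpre
    have hk : (xs.zip (xs.drop 1)).length ≤ k := by omega
    rw [List.drop_eq_nil_of_le hk]
    have hall : pvMono xs s = true := by
      unfold pvMono
      have e : xs.zip (xs.drop 1) = (xs.zip (xs.drop 1)).take k :=
        (List.take_of_length_le hk).symm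
      rw [e]
      exact hpre
    simp [pvCheckAux, hall]
  | succ d ih =>
    intro k hd hpre
    have hk : k < (xs.zip (xs.drop 1)).length := by omega
    rw [List.drop_eq_getElem_cons hk]
    show pvCheckAux xs s (_ :: _) k = _
    unfold pvCheckAux
    set p := (xs.zip (xs.drop 1))[k] with hp
    cases hOK : pvOK p.1 p.2 s
    · rw [if_neg (by decide)]
      have hk' : k < xs.length - 1 := by simpa [pv_pairs_len] using hk
      have hmono : pvMono xs s = false :=
        List.all_eq_false.mpr ⟨p, List.getElem_mem hk, by simp [hOK]⟩
      have hany : ((List.range xs.length).any fun j =>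
            pvMono (xs.take j ++ xs.drop (j + 1)) s) =
          (pvMono (xs.take k ++ xs.drop (k + 1)) s ||
            pvMono (xs.take (k + 1) ++ xs.drop (k + 2)) s) := by
        cases h1 : pvMono (xs.take k ++ xs.drop (k + 1)) s
        · cases h2 : pvMono (xs.take (k + 1) ++ xs.drop (k + 2)) s
          · simp only [Bool.or_self]
            apply List.any_eq_false.mpr
            intro j hj
            rw [List.mem_range] at hj
            simp only [Bool.not_eq_true]
            by_cases hjk : j = k
            · subst hjk; exact h1
            · by_cases hjk1 : j = k + 1
              · subst hjk1; exact h2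
              · exact pv_rem_bad xs s k j hk hOK hj hjk hjk1
          · refine Eq.trans (List.any_eq_true.mpr
              ⟨k + 1, List.mem_range.mpr (by omega), h2⟩) (by simp)
        · refine Eq.trans (List.any_eq_true.mpr
            ⟨k, List.mem_range.mpr (by omega), h1⟩) (by simp)
      rw [hmono, hany, Bool.false_or]
    · rw [if_pos rfl]
      apply ih (k + 1) (by omega)
      have hget : (xs.zip (xs.drop 1))[k]? = some p := List.getElem?_eq_getElem hk
      rw [List.take_add_one, List.all_append, hpre, hget]
      simp [hOK]

-- ===== VERDICT (by name: the statement is the Claim_ definition above) =====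
theorem is_report_valid_2_spec : Claim_equal_is_report_valid_2 := by
  intro report _
  show is_report_valid_2 report = is_report_valid_2_alt report
  unfold is_report_valid_2_alt
  rw [pv_a2_eq, pv_a1_eq]
  have hc1 := pv_checkAux_eq report 1 _ 0 rfl (by simp)
  have hc2 := pv_checkAux_eq report (-1) _ 0 rfl (by simp)
  rw [List.drop_zero] at hc1 hc2
  rw [hc1, hc2]
  have hcongr : ((List.range report.length).any fun j =>
        is_report_valid_1 (report.take j ++ report.drop (j + 1))) =
      (List.range report.length).any fun j =>
        pvMono (report.take j ++ report.drop (j + 1)) 1 ||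
          pvMono (report.take j ++ report.drop (j + 1)) (-1) := by
    exact List.any_congr rfl fun j => pv_a1_eq _
  rw [hcongr, pv_any_or]
  cases pvMono report 1 <;> cases pvMono report (-1) <;>
    cases (List.range report.length).any fun j => pvMono (report.take j ++ report.drop (j + 1)) 1 <;>
    cases (List.range report.length).any fun j => pvMono (report.take j ++ report.drop (j + 1)) (-1) <;>
    simp
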